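-- pv_equiv track=rewrite | github.com/Vajra-Chaitanya/Dual_Mind_Final | verifier.py | _check_efficiency
-- ===== SOURCE A (Python) =====
-- from typing import Dict, Any, List, Tuple
--
-- def _check_efficiency(pipeline: List[Dict[str, Any]]) -> bool:
--     """Check pipeline efficiency."""
--     # Simple check: avoid unnecessary complexity
--     if len(pipeline) > 5:
--         return False
--
--     # Check for logical flow (information gathering before processing)
--     info_tools = ["wikipedia_search", "news_fetcher", "arxiv_summarizer"]
--     processing_tools = ["sentiment_analyzer", "data_plotter", "document_writer"]
--
--     info_positions = []
--     processing_positions = []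
--
--     for i, step in enumerate(pipeline):
--         if step.get("tool") in info_tools:
--             info_positions.append(i)
--         elif step.get("tool") in processing_tools:
--             processing_positions.append(i)
--
--     # Processing tools should generally come after info tools
--     for proc_pos in processing_positions:
--         if not any(info_pos < proc_pos for info_pos in info_positions):
--             return False
--
--     return True
-- ===== SOURCE B (Python) =====
-- from typing import Dict, Any, List, Tuple
--
-- def _check_efficiency(pipeline: List[Dict[str, Any]]) -> bool:
--     """Check pipeline efficiency."""
--     if len(pipeline) > 5:
--         return False
--
--     info_tools = ["wikipedia_search", "news_fetcher", "arxiv_summarizer"]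
--     processing_tools = ["sentiment_analyzer", "data_plotter", "document_writer"]
--
--     seen_info = False
--     for step in pipeline:
--         tool = step.get("tool")
--         if tool in info_tools:
--             seen_info = True
--         elif tool in processing_tools and not seen_info:
--             return False
--     return True
-- ===== Notes on version B (the rewrite author's own statement) =====
-- stated objective: simpler
-- what changed: Replaces the two collected index lists and the nested existence scan over positions with a single forward pass maintaining one boolean seen_info flag, failing immediately on a processing tool with no earlier info tool.
import Mathlib
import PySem

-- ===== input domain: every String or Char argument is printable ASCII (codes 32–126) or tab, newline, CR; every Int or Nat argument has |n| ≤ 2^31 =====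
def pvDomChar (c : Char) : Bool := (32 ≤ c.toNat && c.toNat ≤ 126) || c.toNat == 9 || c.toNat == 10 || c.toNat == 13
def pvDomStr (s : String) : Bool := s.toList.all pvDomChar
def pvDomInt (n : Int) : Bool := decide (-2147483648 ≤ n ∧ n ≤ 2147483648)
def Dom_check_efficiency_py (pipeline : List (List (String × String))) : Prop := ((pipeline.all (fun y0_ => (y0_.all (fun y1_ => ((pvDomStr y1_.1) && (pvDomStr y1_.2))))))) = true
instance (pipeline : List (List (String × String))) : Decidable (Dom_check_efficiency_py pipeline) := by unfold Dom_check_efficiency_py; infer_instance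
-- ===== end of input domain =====

-- B replaces A's two collected index lists and nested existence scan with one
-- forward pass keeping a single seen_info flag (objective: simpler).

-- ===== PORT A =====
-- step.get("tool")
def pvTool (step : List (String × String)) : Option String := PySem.Dict.get? (PySem.Dict.mk step) "tool"

-- 'o in tools' where o is step.get("tool") (None is in no list of strings)
def pvIsIn (o : Option String) (tools : List String) : Bool :=
  match o with
  | some t => tools.contains t
  | none => false

def pvInfoTools : List String := ["wikipedia_search", "news_fetcher", "arxiv_summarizer"]
def pvProcTools : List String := ["sentiment_analyzer", "data_plotter", "document_writer"]

-- the enumerate loop of A collecting info_positions and processing_positions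
def pvStepA (acc : List Int × List Int) (p : Int × List (String × String)) : List Int × List Int :=
  if pvIsIn (pvTool p.2) pvInfoTools then (acc.1 ++ [p.1], acc.2)
  else if pvIsIn (pvTool p.2) pvProcTools then (acc.1, acc.2 ++ [p.1])
  else acc

def check_efficiency_py (pipeline : List (List (String × String))) : Bool :=
  if pipeline.length > 5 then false
  else
    let st := (PySem.List.enumerate pipeline 0).foldl pvStepA ([], [])
    -- 'for proc_pos …: if not any(…): return False; return True'
    st.2.all (fun proc_pos => st.1.any (fun info_pos => info_pos < proc_pos))

-- ===== PORT B =====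
-- single pass with a seen_info flag
def pvGoB : List (List (String × String)) → Bool → Bool
  | [], _ => true
  | step :: rest, seen =>
    if pvIsIn (pvTool step) pvInfoTools then pvGoB rest true
    else if pvIsIn (pvTool step) pvProcTools && !seen then false
    else pvGoB rest seen

def check_efficiency_py_alt (pipeline : List (List (String × String))) : Bool :=
  if pipeline.length > 5 then false
  else pvGoB pipeline false

-- ===== PRECONDITION & SPEC =====
def Spec_check_efficiency_py (pipeline : List (List (String × String))) (out : Bool) : Prop := out = check_efficiency_py_alt pipeline
instance (pipeline : List (List (String × String))) (out : Bool) : Decidable (Spec_check_efficiency_py pipeline out) := by unfold Spec_check_efficiency_py; infer_instance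

-- ===== CLAIM (what is proved, stated in full; the proofs are below) =====
def Claim_equal_check_efficiency_py : Prop := ∀ (pipeline : List (List (String × String))), Dom_check_efficiency_py pipeline → Spec_check_efficiency_py pipeline (check_efficiency_py pipeline)

-- ===== LEMMAS AND PROOFS =====

-- Invariant of A's loop vs B's pass: with all accumulated positions below the
-- next index i, A's final check equals "check so far && B's remainder with
-- seen = (infos nonempty)".
theorem pv_main (l : List (List (String × String))) :
    ∀ (i : Int) (infos procs : List Int),
    (∀ x ∈ infos, x < i) → (∀ x ∈ procs, x < i) →
    (let st := (PySem.List.enumerate l i).foldl pvStepA (infos, procs)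
     st.2.all (fun p => st.1.any (fun q => q < p)))
      = (procs.all (fun p => infos.any (fun q => q < p)) && pvGoB l (!infos.isEmpty)) := by
  induction l with
  | nil => intro i infos procs _ _; simp [PySem.List.enumerate, pvGoB]
  | cons s rest ih =>
    intro i infos procs hinfo hproc
    rw [PySem.List.enumerate_cons]
    simp only [List.foldl_cons]
    by_cases hI : pvIsIn (pvTool s) pvInfoTools
    · -- info tool: append i to infos, seen becomes true
      have h1 : ∀ x ∈ infos ++ [i], x < i + 1 := by
        intro x hx
        rcases List.mem_append.mp hx with h | h
        · exact lt_trans (hinfo x h) (by omega)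
        · simp at h; omega
      have h2 : ∀ x ∈ procs, x < i + 1 := fun x hx => lt_trans (hproc x hx) (by omega)
      have := ih (i+1) (infos ++ [i]) procs h1 h2
      simp only [pvStepA, hI, if_pos] at this ⊢
      rw [this]
      have hpt : ∀ p ∈ procs, ((infos ++ [i]).any fun q => decide (q < p))
          = (infos.any fun q => decide (q < p)) := by
        intro p hp
        have hpi : ¬ (i < p) := by have := hproc p hp; omega
        simp [List.any_append, hpi]
      have heq : procs.all (fun p => (infos ++ [i]).any (fun q => q < p))
          = procs.all (fun p => infos.any (fun q => q < p)) := by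
        rw [Bool.eq_iff_iff]
        simp only [List.all_eq_true]
        exact ⟨fun h p hp => by rw [← hpt p hp]; exact h p hp,
               fun h p hp => by rw [hpt p hp]; exact h p hp⟩
      rw [heq]
      have hne : (infos ++ [i]).isEmpty = false := by simp
      rw [hne]
      simp [pvGoB, hI]
    · by_cases hP : pvIsIn (pvTool s) pvProcTools
      · -- processing tool: append i to procs
        have h1 : ∀ x ∈ infos, x < i + 1 := fun x hx => lt_trans (hinfo x hx) (by omega)
        have h2 : ∀ x ∈ procs ++ [i], x < i + 1 := by
          intro x hx
          rcases List.mem_append.mp hx with h | h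
          · exact lt_trans (hproc x h) (by omega)
          · simp at h; omega
        have := ih (i+1) infos (procs ++ [i]) h1 h2
        simp only [pvStepA, hI, hP, if_neg, if_pos, Bool.false_eq_true, not_false_eq_true] at this ⊢
        rw [this]
        have hkey : (infos.any (fun q => q < i)) = !infos.isEmpty := by
          cases infos with
          | nil => simp
          | cons a as =>
            simp only [List.isEmpty_cons, Bool.not_false, List.any_cons, Bool.or_eq_true,
              decide_eq_true_eq]
            have : a < i := hinfo a (List.mem_cons_self ..)
            simp [this]
        rw [List.all_append]
        simp only [List.all_cons, List.all_nil, Bool.and_true, hkey]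
        cases hE : infos.isEmpty with
        | true => simp [pvGoB, hI, hP]
        | false => simp [pvGoB, hI, hP]
      · -- neither: state unchanged
        have := ih (i+1) infos procs (fun x hx => lt_trans (hinfo x hx) (by omega))
          (fun x hx => lt_trans (hproc x hx) (by omega))
        simp only [pvStepA, hI, hP, if_neg, Bool.false_eq_true, not_false_eq_true] at this ⊢
        rw [this]
        simp [pvGoB, hI, hP]

-- ===== VERDICT (by name: the statement is the Claim_ definition above) =====
theorem check_efficiency_py_spec : Claim_equal_check_efficiency_py := by
  intro pipeline _
  unfold Spec_check_efficiency_py check_efficiency_py check_efficiency_py_alt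
  by_cases h : pipeline.length > 5
  · simp [h]
  · simp only [h, if_neg, not_false_eq_true]
    have := pv_main pipeline 0 [] [] (by simp) (by simp)
    simpa using this
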